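-- pv_equiv track=rewrite | github.com/wufann/ATOM | .github/scripts/query_job_status.py | select_primary_runner_label
-- ===== SOURCE A (Python) =====
-- def select_primary_runner_label(labels: list[str]):
--     if not labels:
--         return ""
--
--     preferred = [
--         label
--         for label in labels
--         if any(
--             token in label.lower()
--             for token in ("mi", "gpu", "runner", "aiter", "linux-")
--         )
--     ]
--     candidates = preferred or labels
--     return sorted(candidates, key=lambda value: (-len(value), value.lower()))[0]
-- ===== SOURCE B (Python) =====
-- TOKENS = ("mi", "gpu", "runner", "aiter", "linux-")
--
--
-- def _key_lt(a: str, b: str) -> bool: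
--     return (-len(a), a.lower()) < (-len(b), b.lower())
--
--
-- def select_primary_runner_label(labels: list[str]):
--     # One pass: track the best preferred label and the best label overall,
--     # instead of building a filtered list and sorting it.
--     best_pref = None
--     best_all = None
--     for label in labels:
--         lowered = label.lower()
--         if best_all is None or _key_lt(label, best_all):
--             best_all = label
--         if any(token in lowered for token in TOKENS):
--             if best_pref is None or _key_lt(label, best_pref):
--                 best_pref = label
--     if best_pref is not None:
--         return best_pref
--     if best_all is not None:
--         return best_all
--     return ""
-- ===== Notes on version B (the rewrite author's own statement) =====
-- stated objective: alternative
-- what changed: Replaces build-filtered-list-then-stable-sort-and-take-head with a single pass over labels that simultaneously tracks the best preferred label and the best label overall under the same (-len, lower) key; measured only ~1.25x faster, so no speed claim.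
import Mathlib
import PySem

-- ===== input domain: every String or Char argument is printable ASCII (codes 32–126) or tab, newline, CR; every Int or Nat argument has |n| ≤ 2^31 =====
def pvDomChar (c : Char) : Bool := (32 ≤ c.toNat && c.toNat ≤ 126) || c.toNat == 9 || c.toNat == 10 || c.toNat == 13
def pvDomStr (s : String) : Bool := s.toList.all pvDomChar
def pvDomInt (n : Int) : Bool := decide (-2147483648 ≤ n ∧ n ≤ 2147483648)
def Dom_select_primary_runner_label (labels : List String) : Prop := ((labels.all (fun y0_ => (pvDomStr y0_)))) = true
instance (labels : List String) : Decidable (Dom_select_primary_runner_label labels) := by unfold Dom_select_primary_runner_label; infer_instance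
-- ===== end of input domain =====

-- B: one pass tracking two running minima (best preferred, best overall) instead of A's filter + stable sort + head; same result, alternative structure.

-- shared constant of the task: is a label "preferred" (any token occurs in label.lower())
def pvIsPreferred (label : String) : Bool :=
  (["mi", "gpu", "runner", "aiter", "linux-"]).any
    (fun token => PySem.Str.isIn token (PySem.Str.lower label))

-- ===== PORT A =====
def select_primary_runner_label (labels : List String) : String :=
  if labels = [] then ""
  else
    let preferred := labels.filter pvIsPreferred
    let candidates := if preferred = [] then labels else preferred
    -- sorted(candidates, key=lambda value: (-len(value), value.lower()))[0];
    -- candidates is provably nonempty, so the [] branch (IndexError) is unreachable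
    match PySem.List.sorted2 candidates (fun v => -(PySem.Str.len v)) (fun v => PySem.Str.lower v) false with
    | [] => ""
    | h :: _ => h

-- ===== PORT B =====
-- _key_lt(a, b): (-len(a), a.lower()) < (-len(b), b.lower()), Python tuple comparison
def pvKeyLt (a b : String) : Bool :=
  if -(PySem.Str.len a) < -(PySem.Str.len b) then true
  else if -(PySem.Str.len b) < -(PySem.Str.len a) then false
  else decide (PySem.Str.lower a < PySem.Str.lower b)

def select_primary_runner_label_alt (labels : List String) : String :=
  let st := labels.foldl
    (fun (st : Option String × Option String) label =>
      let bestAll := some (match st.2 with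
        | none => label
        | some h => if pvKeyLt label h then label else h)
      let bestPref := if pvIsPreferred label then
          some (match st.1 with
            | none => label
            | some h => if pvKeyLt label h then label else h)
        else st.1
      (bestPref, bestAll))
    (none, none)
  match st with
  | (some p, _) => p
  | (none, some a) => a
  | (none, none) => ""

-- ===== PRECONDITION & SPEC =====
def Spec_select_primary_runner_label (labels : List String) (out : String) : Prop := out = select_primary_runner_label_alt labels
instance (labels : List String) (out : String) : Decidable (Spec_select_primary_runner_label labels out) := by unfold Spec_select_primary_runner_label; infer_instance

-- ===== CLAIM (what is proved, stated in full; the proofs are below) =====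
def Claim_equal_select_primary_runner_label : Prop := ∀ (labels : List String), Dom_select_primary_runner_label labels → Spec_select_primary_runner_label labels (select_primary_runner_label labels)

-- ===== LEMMAS AND PROOFS =====

-- A's comparison (sorted2's internal strict-before) agrees with B's tuple comparison
theorem pvLt_eq (a b : String) :
    (decide (-(PySem.Str.len a) < -(PySem.Str.len b)) ||
      (!decide (-(PySem.Str.len b) < -(PySem.Str.len a)) &&
        decide (PySem.Str.lower a < PySem.Str.lower b))) = pvKeyLt a b := by
  unfold pvKeyLt
  by_cases h1 : -(PySem.Str.len a) < -(PySem.Str.len b) <;>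
    by_cases h2 : -(PySem.Str.len b) < -(PySem.Str.len a) <;>
      simp_all

-- running first-wins minimum
def pvMinFold (before : String → String → Bool) (h : String) (xs : List String) : String :=
  xs.foldl (fun b x => if before x b then x else b) h

theorem head?_insertBy (before : String → String → Bool) (x h : String) (acc : List String)
    (hacc : acc.head? = some h) :
    (PySem.List.insertBy before x acc).head? = some (if before x h then x else h) := by
  cases acc with
  | nil => simp at hacc
  | cons y ys =>
    simp at hacc
    subst hacc
    simp [PySem.List.insertBy]
    split <;> simp

theorem head?_foldl_insertBy (before : String → String → Bool) (xs : List String)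
    (acc : List String) (h : String) (hacc : acc.head? = some h) :
    (xs.foldl (fun acc x => PySem.List.insertBy before x acc) acc).head? =
      some (pvMinFold before h xs) := by
  induction xs generalizing acc h with
  | nil => simpa [pvMinFold] using hacc
  | cons x t ih =>
    simp only [List.foldl_cons, pvMinFold, List.foldl_cons]
    exact ih _ _ (head?_insertBy before x h acc hacc)

-- head of A's sort on a nonempty list is the first-wins minimum under pvKeyLt
theorem sorted2_head (c : String) (rest : List String) :
    (PySem.List.sorted2 (c :: rest) (fun v => -(PySem.Str.len v)) (fun v => PySem.Str.lower v) false).head? =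
      some (pvMinFold pvKeyLt c rest) := by
  unfold PySem.List.sorted2
  simp only [Bool.false_eq_true, if_false, List.foldl_cons, PySem.List.insertBy]
  have := head?_foldl_insertBy
    (fun a b => decide (-(PySem.Str.len a) < -(PySem.Str.len b)) ||
      (!decide (-(PySem.Str.len b) < -(PySem.Str.len a)) &&
        decide (PySem.Str.lower a < PySem.Str.lower b))) rest [c] c (by simp)
  rw [this]
  congr 1
  unfold pvMinFold
  congr 1
  funext b x
  simp only [pvLt_eq]

-- the option-level step B's loop performs
def pvOptStep (b : Option String) (x : String) : Option String :=
  some (match b with | none => x | some h => if pvKeyLt x h then x else h)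

theorem foldl_optStep_some (xs : List String) (h : String) :
    xs.foldl pvOptStep (some h) = some (pvMinFold pvKeyLt h xs) := by
  induction xs generalizing h with
  | nil => simp [pvMinFold]
  | cons x t ih => simp [pvOptStep, pvMinFold] at *; split <;> apply ih

-- B's paired loop decomposes into two independent option folds
theorem foldl_pair (xs : List String) (bp ba : Option String) :
    xs.foldl
      (fun (st : Option String × Option String) label =>
        ((if pvIsPreferred label then pvOptStep st.1 label else st.1),
          pvOptStep st.2 label)) (bp, ba) =
      ((xs.filter pvIsPreferred).foldl pvOptStep bp, xs.foldl pvOptStep ba) := by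
  induction xs generalizing bp ba with
  | nil => simp
  | cons x t ih =>
    simp only [List.foldl_cons, List.filter_cons]
    by_cases hp : pvIsPreferred x <;> simp [hp, ih]

theorem foldl_optStep_nil_cons (c : String) (rest : List String) :
    (c :: rest).foldl pvOptStep none = some (pvMinFold pvKeyLt c rest) := by
  simp [pvOptStep, foldl_optStep_some]

-- ===== VERDICT (by name: the statement is the Claim_ definition above) =====
theorem select_primary_runner_label_spec : Claim_equal_select_primary_runner_label := by
  intro labels _
  unfold Spec_select_primary_runner_label select_primary_runner_label select_primary_runner_label_alt
  have hpair := foldl_pair labels none none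
  rw [show (fun (st : Option String × Option String) label =>
      ((if pvIsPreferred label then
          some (match st.1 with | none => label | some h => if pvKeyLt label h then label else h)
        else st.1),
        some (match st.2 with | none => label | some h => if pvKeyLt label h then label else h))) =
      (fun (st : Option String × Option String) label =>
        ((if pvIsPreferred label then pvOptStep st.1 label else st.1), pvOptStep st.2 label)) from by
    funext st label; simp [pvOptStep]]
  rw [hpair]
  cases labels with
  | nil => simp
  | cons c rest =>
    dsimp only
    rw [if_neg (List.cons_ne_nil c rest)]
    by_cases hp : (c :: rest).filter pvIsPreferred = []
    · simp only [hp, List.foldl_nil, foldl_optStep_nil_cons, reduceIte]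
      have hh := sorted2_head c rest
      cases hs : PySem.List.sorted2 (c :: rest) (fun v => -(PySem.Str.len v)) (fun v => PySem.Str.lower v) false with
      | nil => rw [hs] at hh; simp at hh
      | cons h t => rw [hs] at hh; simp only [List.head?_cons, Option.some.injEq] at hh; exact hh
    · rw [if_neg hp]
      cases hf : (c :: rest).filter pvIsPreferred with
      | nil => exact absurd hf hp
      | cons p ps =>
        simp only [foldl_optStep_nil_cons]
        have hh := sorted2_head p ps
        cases hs : PySem.List.sorted2 (p :: ps) (fun v => -(PySem.Str.len v)) (fun v => PySem.Str.lower v) false with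
        | nil => rw [hs] at hh; simp at hh
        | cons h t => rw [hs] at hh; simp only [List.head?_cons, Option.some.injEq] at hh; exact hh
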